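-- pv_equiv track=rewrite | github.com/AlifSrSE/ProblemSolves | 1941D-rudoftAndTheBallGame.py | solve
-- ===== SOURCE A (Python) =====
-- def solve(n, r, c, x):
--     players = {x - 1}
--
--     for i in range(len(r)):
--         new_players = set()
--         for player in players:
--             if c[i] in ('0', '?'):
--                 new_players.add((player + r[i]) % n)
--             if c[i] in ('1', '?'):
--                 new_players.add((player - r[i]) % n)
--         players = new_players
--
--     return f"{len(players)}\n{' '.join(str(p + 1) for p in sorted(players))}"
-- ===== SOURCE B (Python) =====
-- def merge(a, b):
--     # sorted union (no duplicates) of two strictly increasing lists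
--     out = []
--     i = j = 0
--     while i < len(a) and j < len(b):
--         if a[i] < b[j]:
--             out.append(a[i]); i += 1
--         elif b[j] < a[i]:
--             out.append(b[j]); j += 1
--         else:
--             out.append(a[i]); i += 1; j += 1
--     out.extend(a[i:])
--     out.extend(b[j:])
--     return out
--
--
-- def solve(n, r, c, x):
--     # sorted list of the distinct current positions, kept strictly increasing
--     pos = [(x - 1) % n]
--     for ri, ci in zip(r, c):
--         k = ri % n
--         plus = [p + k - n for p in pos if p + k >= n] + [p + k for p in pos if p + k < n]
--         minus = [p - k for p in pos if p - k >= 0] + [p - k + n for p in pos if p - k < 0]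
--         if ci == '0':
--             pos = plus
--         elif ci == '1':
--             pos = minus
--         elif ci == '?':
--             pos = merge(plus, minus)
--         else:
--             pos = []
--     return f"{len(pos)}\n{' '.join(str(p + 1) for p in pos)}"
-- ===== Notes on version B (the rewrite author's own statement) =====
-- stated objective: alternative
-- what changed: B replaces A's hash-set rounds plus final sort by a strictly-increasing list of positions maintained throughout: each round rotates the sorted list by list splitting (wrapped part spliced in front/back) and unions the two rotations with a two-pointer merge, so no set and no final sort are needed.
-- intended difference: On an empty rounds list whose start label x is not already canonical (x in 1..n for n>0, x in n+2..1 for n<0), A echoes the raw label x while B returns the canonical circle position ((x-1) mod n)+1, the intended label for a position on the circle. — e.g. on solve(1, [], "", 2): A returns "1\n2", B returns "1\n1"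
-- outside the precondition, e.g. on solve(-3, [1], '0', 1): A returns '1\n-1', B returns '1\n2'; on solve(0, [], '', 1): A returns '1\n1', B raises ZeroDivisionError; on solve(0, [1], 'x', 1): A returns '0\n', B raises ZeroDivisionError
import Mathlib
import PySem

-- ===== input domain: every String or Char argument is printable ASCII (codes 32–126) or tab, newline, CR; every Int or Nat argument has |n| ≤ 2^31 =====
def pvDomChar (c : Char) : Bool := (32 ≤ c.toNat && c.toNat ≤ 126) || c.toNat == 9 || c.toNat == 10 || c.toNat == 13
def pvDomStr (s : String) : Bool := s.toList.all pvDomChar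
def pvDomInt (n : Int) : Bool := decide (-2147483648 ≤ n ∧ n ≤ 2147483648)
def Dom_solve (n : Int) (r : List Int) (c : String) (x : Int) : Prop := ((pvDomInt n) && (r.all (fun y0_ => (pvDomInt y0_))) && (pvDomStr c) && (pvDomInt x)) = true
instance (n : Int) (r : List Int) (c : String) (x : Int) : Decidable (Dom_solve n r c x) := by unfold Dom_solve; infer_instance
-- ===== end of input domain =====

-- B keeps the positions as one strictly increasing list (rotate by splitting, union by
-- two-pointer merge) instead of A's set-per-round plus final sort; same cost class.

-- ===== PORT A =====
-- one round of A's loop: rebuild the set from every current player (c[i] read as in Python)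
def solveAStep (n : Int) (r : List Int) (c : String) (players : PySem.Set Int) (i : Int) : PySem.Set Int :=
  let ci : Char := (PySem.Str.pyGet? c i).getD ' '
  let ri : Int := PySem.List.pyGetD r i 0
  players.foldl (fun np p =>
    let np := if ci = '0' ∨ ci = '?' then PySem.Set.add np (PySem.Int.mod (p + ri) n) else np
    if ci = '1' ∨ ci = '?' then PySem.Set.add np (PySem.Int.mod (p - ri) n) else np)
    PySem.Set.empty

def solve (n : Int) (r : List Int) (c : String) (x : Int) : String :=
  let players : PySem.Set Int := PySem.Set.ofList [x - 1]
  let players := (PySem.List.pyRange 0 (r.length : Int) 1).foldl (solveAStep n r c) players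
  PySem.Int.toStr (PySem.Set.len players) ++ "\n" ++
    PySem.Str.join " " ((PySem.List.sorted players (fun p => p)).map (fun p => PySem.Int.toStr (p + 1)))

-- ===== PORT B =====
-- two-pointer merge of two strictly increasing lists (Source B's merge)
def pvMerge : List Int → List Int → List Int
  | [], b => b
  | a, [] => a
  | xa :: a, yb :: b =>
    if xa < yb then xa :: pvMerge a (yb :: b)
    else if yb < xa then yb :: pvMerge (xa :: a) b
    else xa :: pvMerge a b
termination_by a b => a.length + b.length

-- one round of Source B's loop: rotate the sorted list both ways by splitting, then pick/merge
def solveBStep (n : Int) (pos : List Int) (rc : Int × Char) : List Int :=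
  let k := PySem.Int.mod rc.1 n
  let plus := (pos.filter (fun p => n ≤ p + k)).map (fun p => p + k - n)
           ++ (pos.filter (fun p => p + k < n)).map (fun p => p + k)
  let minus := (pos.filter (fun p => 0 ≤ p - k)).map (fun p => p - k)
            ++ (pos.filter (fun p => p - k < 0)).map (fun p => p - k + n)
  if rc.2 = '0' then plus
  else if rc.2 = '1' then minus
  else if rc.2 = '?' then pvMerge plus minus
  else []

def solve_alt (n : Int) (r : List Int) (c : String) (x : Int) : String :=
  let pos : List Int := [PySem.Int.mod (x - 1) n]
  let pos := (r.zip c.toList).foldl (solveBStep n) pos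
  PySem.Int.toStr (pos.length : Int) ++ "\n" ++
    PySem.Str.join " " (pos.map (fun p => PySem.Int.toStr (p + 1)))

-- ===== PRECONDITION & SPEC =====
-- Pre_ keeps the natural domain: n = 0 is excluded (B raises ZeroDivisionError, and so does A
-- once a move is applied); with moves pending, either n ≥ 1 with enough direction characters
-- (fewer make A raise IndexError), or some character among the first len(r) is not '0'/'1'/'?'
-- (then both programs empty the position set and n's sign never matters); n < 0 with moves and
-- an all-valid direction prefix is no circle — A's % then yields non-positive labels — and is
-- excluded as outside the natural domain.
def Pre_solve (n : Int) (r : List Int) (c : String) (x : Int) : Prop :=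
  n ≠ 0 ∧ (r = [] ∨ (1 ≤ n ∧ (r.length : Int) ≤ PySem.Str.len c) ∨
    ∃ ch ∈ c.toList.take r.length, ch ≠ '0' ∧ ch ≠ '1' ∧ ch ≠ '?')
instance (n : Int) (r : List Int) (c : String) (x : Int) : Decidable (Pre_solve n r c x) := by
  unfold Pre_solve; infer_instance
def pvWitness_solve : Int × List Int × String × Int := (3, [1, 2], "0?", 2)

-- On an empty rounds list whose start label x is not already canonical (x in 1..n for n > 0,
-- x in n+2..1 for n < 0), A echoes the raw label x while B returns the canonical circle
-- position ((x-1) mod n)+1, the intended label for a position on the circle.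
def D_solve (n : Int) (r : List Int) (c : String) (x : Int) : Prop :=
  r = [] ∧ ¬((1 ≤ x ∧ x ≤ n) ∨ (n < 0 ∧ n + 2 ≤ x ∧ x ≤ 1))
instance (n : Int) (r : List Int) (c : String) (x : Int) : Decidable (D_solve n r c x) := by
  unfold D_solve; infer_instance

def Spec_solve (n : Int) (r : List Int) (c : String) (x : Int) (out : String) : Prop :=
  ¬ D_solve n r c x → out = solve_alt n r c x
instance (n : Int) (r : List Int) (c : String) (x : Int) (out : String) : Decidable (Spec_solve n r c x out) := by
  unfold Spec_solve; infer_instance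

def pvDiffWitness_solve : Int × List Int × String × Int := (1, [], "", 2)
def pvDiffWitnessOut_solve : String × String := ("1\n2", "1\n1")

-- ===== CLAIM (what is proved, stated in full; the proofs are below) =====
def Claim_unchanged_solve : Prop := ∀ (n : Int) (r : List Int) (c : String) (x : Int), Dom_solve n r c x → Pre_solve n r c x → Spec_solve n r c x (solve n r c x)
def Claim_changed_solve : Prop := Dom_solve (pvDiffWitness_solve.1) (pvDiffWitness_solve.2.1) (pvDiffWitness_solve.2.2.1) (pvDiffWitness_solve.2.2.2) ∧ Pre_solve (pvDiffWitness_solve.1) (pvDiffWitness_solve.2.1) (pvDiffWitness_solve.2.2.1) (pvDiffWitness_solve.2.2.2) ∧ D_solve (pvDiffWitness_solve.1) (pvDiffWitness_solve.2.1) (pvDiffWitness_solve.2.2.1) (pvDiffWitness_solve.2.2.2) ∧ solve (pvDiffWitness_solve.1) (pvDiffWitness_solve.2.1) (pvDiffWitness_solve.2.2.1) (pvDiffWitness_solve.2.2.2) = pvDiffWitnessOut_solve.1 ∧ solve_alt (pvDiffWitness_solve.1) (pvDiffWitness_solve.2.1) (pvDiffWitness_solve.2.2.1) (pvDiffWitness_solve.2.2.2)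 = pvDiffWitnessOut_solve.2 ∧ pvDiffWitnessOut_solve.1 ≠ pvDiffWitnessOut_solve.2
def Claim_exact_solve : Prop := ∀ (n : Int) (r : List Int) (c : String) (x : Int), Dom_solve n r c x → Pre_solve n r c x → D_solve n r c x → solve n r c x ≠ solve_alt n r c x

-- ===== LEMMAS AND PROOFS =====

-- the invariant tying A's set S to B's list L between rounds: L is the strictly increasing
-- list of the residues mod n of S's members
def pvInv (n : Int) (S : PySem.Set Int) (L : List Int) : Prop :=
  S.Nodup ∧ L.Pairwise (· < ·) ∧ (∀ q ∈ L, 0 ≤ q ∧ q < n) ∧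
    (∀ q, q ∈ L ↔ ∃ p ∈ S, PySem.Int.mod p n = q)

theorem pvMerge_mem (a b : List Int) (q : Int) : q ∈ pvMerge a b ↔ q ∈ a ∨ q ∈ b := by
  fun_induction pvMerge a b with
  | case1 => simp [pvMerge]
  | case2 => simp [pvMerge]
  | case3 xa a yb b h ih => simp [pvMerge, h, ih]; tauto
  | case4 xa a yb b h h2 ih => simp [pvMerge, h, h2, ih]; tauto
  | case5 xa a yb b h h2 ih =>
    have : xa = yb := by omega
    subst this
    simp [pvMerge, h, h2, ih]; tauto

theorem pvMerge_pairwise (a b : List Int) (ha : a.Pairwise (· < ·)) (hb : b.Pairwise (· < ·)) :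
    (pvMerge a b).Pairwise (· < ·) := by
  fun_induction pvMerge a b with
  | case1 => simpa [pvMerge]
  | case2 => simpa [pvMerge]
  | case3 xa a yb b h ih =>
    simp only [List.pairwise_cons] at ha hb
    rw [List.pairwise_cons]
    refine ⟨?_, ih ha.2 (List.pairwise_cons.2 hb)⟩
    intro q hq
    rcases (pvMerge_mem _ _ q).1 hq with h1 | h1
    · exact ha.1 q h1
    · rcases List.mem_cons.1 h1 with rfl | h2
      · exact h
      · exact lt_trans h (hb.1 q h2)
  | case4 xa a yb b h h2 ih =>
    simp only [List.pairwise_cons] at ha hb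
    rw [List.pairwise_cons]
    refine ⟨?_, ih (List.pairwise_cons.2 ha) hb.2⟩
    intro q hq
    rcases (pvMerge_mem _ _ q).1 hq with h1 | h1
    · rcases List.mem_cons.1 h1 with rfl | h3
      · exact h2
      · exact lt_trans h2 (ha.1 q h3)
    · exact hb.1 q h1
  | case5 xa a yb b h h2 ih =>
    have hxy : xa = yb := by omega
    subst hxy
    simp only [List.pairwise_cons] at ha hb
    rw [List.pairwise_cons]
    refine ⟨?_, ih ha.2 hb.2⟩
    intro q hq
    rcases (pvMerge_mem _ _ q).1 hq with h1 | h1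
    · exact ha.1 q h1
    · exact hb.1 q h1
theorem pvFoldA_char (P0 P1 : Prop) [Decidable P0] [Decidable P1] (f0 f1 : Int → Int)
    (S : List Int) (init : PySem.Set Int) (hinit : init.Nodup) :
    (S.foldl (fun np p =>
        let np' := if P0 then PySem.Set.add np (f0 p) else np
        if P1 then PySem.Set.add np' (f1 p) else np') init).Nodup ∧
    ∀ q, q ∈ S.foldl (fun np p =>
        let np' := if P0 then PySem.Set.add np (f0 p) else np
        if P1 then PySem.Set.add np' (f1 p) else np') init ↔
      q ∈ init ∨ (P0 ∧ ∃ p ∈ S, f0 p = q) ∨ (P1 ∧ ∃ p ∈ S, f1 p = q) := by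
  induction S generalizing init with
  | nil => simpa using hinit
  | cons p S ih =>
    simp only [List.foldl_cons]
    have hstep : (let np' := if P0 then PySem.Set.add init (f0 p) else init
        if P1 then PySem.Set.add np' (f1 p) else np').Nodup := by
      by_cases h0 : P0 <;> by_cases h1 : P1 <;>
        first
          | exact PySem.Set.nodup_add _ _ (PySem.Set.nodup_add _ _ hinit)
          | simp [h0, h1, PySem.Set.nodup_add, hinit]
    obtain ⟨hnd, hmem⟩ := ih _ hstep
    refine ⟨hnd, fun q => ?_⟩
    rw [hmem q]
    have : q ∈ (let np' := if P0 then PySem.Set.add init (f0 p) else init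
        if P1 then PySem.Set.add np' (f1 p) else np') ↔
        q ∈ init ∨ (P0 ∧ f0 p = q) ∨ (P1 ∧ f1 p = q) := by
      by_cases h0 : P0 <;> by_cases h1 : P1 <;>
        simp [h0, h1, PySem.Set.mem_add] <;> tauto
    rw [this]
    simp only [List.mem_cons]
    constructor
    · rintro ((hq | ⟨h0, hf⟩ | ⟨h1, hf⟩) | ⟨h0, pp, hp, hf⟩ | ⟨h1, pp, hp, hf⟩)
      · exact Or.inl hq
      · exact Or.inr (Or.inl ⟨h0, p, Or.inl rfl, hf⟩)
      · exact Or.inr (Or.inr ⟨h1, p, Or.inl rfl, hf⟩)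
      · exact Or.inr (Or.inl ⟨h0, pp, Or.inr hp, hf⟩)
      · exact Or.inr (Or.inr ⟨h1, pp, Or.inr hp, hf⟩)
    · rintro (hq | ⟨h0, pp, (rfl | hp), hf⟩ | ⟨h1, pp, (rfl | hp), hf⟩)
      · exact Or.inl (Or.inl hq)
      · exact Or.inl (Or.inr (Or.inl ⟨h0, hf⟩))
      · exact Or.inr (Or.inl ⟨h0, pp, hp, hf⟩)
      · exact Or.inl (Or.inr (Or.inr ⟨h1, hf⟩))
      · exact Or.inr (Or.inr ⟨h1, pp, hp, hf⟩)
theorem pvEmodId (n a : Int) (h0 : 0 ≤ a) (h1 : a < n) : a % n = a := Int.emod_eq_of_lt h0 h1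
theorem pvEmodHigh (n a : Int) (h0 : n ≤ a) (h1 : a < 2*n) : a % n = a - n := by
  rw [← Int.sub_emod_right]; exact Int.emod_eq_of_lt (by omega) (by omega)
theorem pvEmodLow (n a : Int) (hn : 0 < n) (h0 : -n ≤ a) (h1 : a < 0) : a % n = a + n := by
  rw [← Int.add_emod_right]; exact Int.emod_eq_of_lt (by omega) (by omega)
theorem pvModAdd (n a b : Int) (hn : 0 < n) :
    PySem.Int.mod (a + b) n = (PySem.Int.mod a n + PySem.Int.mod b n) % n := by
  rw [PySem.Int.mod_eq_emod_of_pos hn, PySem.Int.mod_eq_emod_of_pos hn,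
    PySem.Int.mod_eq_emod_of_pos hn, Int.add_emod]
theorem pvModSub (n a b : Int) (hn : 0 < n) :
    PySem.Int.mod (a - b) n = (PySem.Int.mod a n - PySem.Int.mod b n) % n := by
  rw [PySem.Int.mod_eq_emod_of_pos hn, PySem.Int.mod_eq_emod_of_pos hn,
    PySem.Int.mod_eq_emod_of_pos hn, Int.sub_emod]

theorem pvPlus (n k : Int) (L : List Int) (hn : 0 < n) (hk0 : 0 ≤ k) (hk1 : k < n)
    (hL : L.Pairwise (· < ·)) (hrange : ∀ q ∈ L, 0 ≤ q ∧ q < n) :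
    ((L.filter (fun p => n ≤ p + k)).map (fun p => p + k - n)
       ++ (L.filter (fun p => p + k < n)).map (fun p => p + k)).Pairwise (· < ·) ∧
    (∀ q ∈ (L.filter (fun p => n ≤ p + k)).map (fun p => p + k - n)
       ++ (L.filter (fun p => p + k < n)).map (fun p => p + k), 0 ≤ q ∧ q < n) ∧
    (∀ q, q ∈ (L.filter (fun p => n ≤ p + k)).map (fun p => p + k - n)
       ++ (L.filter (fun p => p + k < n)).map (fun p => p + k) ↔ ∃ p ∈ L, (p + k) % n = q) := by
  refine ⟨?_, ?_, ?_⟩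
  · rw [List.pairwise_append]
    refine ⟨?_, ?_, ?_⟩
    · rw [List.pairwise_map]
      exact (hL.filter _).imp (by intro a b h; omega)
    · rw [List.pairwise_map]
      exact (hL.filter _).imp (by intro a b h; omega)
    · intro a ha b hb
      simp only [List.mem_map, List.mem_filter, decide_eq_true_eq] at ha hb
      obtain ⟨p, ⟨hp, hc⟩, rfl⟩ := ha
      obtain ⟨p', ⟨hp', hc'⟩, rfl⟩ := hb
      have := hrange p hp; have := hrange p' hp'
      omega
  · intro q hq
    simp only [List.mem_append, List.mem_map, List.mem_filter, decide_eq_true_eq] at hq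
    rcases hq with ⟨p, ⟨hp, hc⟩, rfl⟩ | ⟨p, ⟨hp, hc⟩, rfl⟩ <;> have := hrange p hp <;> omega
  · intro q
    simp only [List.mem_append, List.mem_map, List.mem_filter, decide_eq_true_eq]
    constructor
    · rintro (⟨p, ⟨hp, hc⟩, rfl⟩ | ⟨p, ⟨hp, hc⟩, rfl⟩) <;> refine ⟨p, hp, ?_⟩
      · have := hrange p hp; exact pvEmodHigh n (p + k) hc (by omega)
      · have := hrange p hp; exact pvEmodId n (p + k) (by omega) hc
    · rintro ⟨p, hp, rfl⟩
      have := hrange p hp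
      by_cases hc : n ≤ p + k
      · exact Or.inl ⟨p, ⟨hp, hc⟩, (pvEmodHigh n (p + k) hc (by omega)).symm⟩
      · exact Or.inr ⟨p, ⟨hp, by omega⟩, (pvEmodId n (p + k) (by omega) (by omega)).symm⟩

theorem pvMinus (n k : Int) (L : List Int) (hn : 0 < n) (hk0 : 0 ≤ k) (hk1 : k < n)
    (hL : L.Pairwise (· < ·)) (hrange : ∀ q ∈ L, 0 ≤ q ∧ q < n) :
    ((L.filter (fun p => 0 ≤ p - k)).map (fun p => p - k)
       ++ (L.filter (fun p => p - k < 0)).map (fun p => p - k + n)).Pairwise (· < ·) ∧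
    (∀ q ∈ (L.filter (fun p => 0 ≤ p - k)).map (fun p => p - k)
       ++ (L.filter (fun p => p - k < 0)).map (fun p => p - k + n), 0 ≤ q ∧ q < n) ∧
    (∀ q, q ∈ (L.filter (fun p => 0 ≤ p - k)).map (fun p => p - k)
       ++ (L.filter (fun p => p - k < 0)).map (fun p => p - k + n) ↔ ∃ p ∈ L, (p - k) % n = q) := by
  refine ⟨?_, ?_, ?_⟩
  · rw [List.pairwise_append]
    refine ⟨?_, ?_, ?_⟩
    · rw [List.pairwise_map]
      exact (hL.filter _).imp (by intro a b h; omega)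
    · rw [List.pairwise_map]
      exact (hL.filter _).imp (by intro a b h; omega)
    · intro a ha b hb
      simp only [List.mem_map, List.mem_filter, decide_eq_true_eq] at ha hb
      obtain ⟨p, ⟨hp, hc⟩, rfl⟩ := ha
      obtain ⟨p', ⟨hp', hc'⟩, rfl⟩ := hb
      have := hrange p hp; have := hrange p' hp'
      omega
  · intro q hq
    simp only [List.mem_append, List.mem_map, List.mem_filter, decide_eq_true_eq] at hq
    rcases hq with ⟨p, ⟨hp, hc⟩, rfl⟩ | ⟨p, ⟨hp, hc⟩, rfl⟩ <;> have := hrange p hp <;> omega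
  · intro q
    simp only [List.mem_append, List.mem_map, List.mem_filter, decide_eq_true_eq]
    constructor
    · rintro (⟨p, ⟨hp, hc⟩, rfl⟩ | ⟨p, ⟨hp, hc⟩, rfl⟩) <;> refine ⟨p, hp, ?_⟩
      · have := hrange p hp; exact pvEmodId n (p - k) hc (by omega)
      · have := hrange p hp; exact pvEmodLow n (p - k) hn (by omega) hc
    · rintro ⟨p, hp, rfl⟩
      have := hrange p hp
      by_cases hc : 0 ≤ p - k
      · exact Or.inl ⟨p, ⟨hp, hc⟩, (pvEmodId n (p - k) hc (by omega)).symm⟩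
      · exact Or.inr ⟨p, ⟨hp, by omega⟩, (pvEmodLow n (p - k) hn (by omega) (by omega)).symm⟩

theorem pvStep (n ri : Int) (ci : Char) (r : List Int) (c : String) (i : Int)
    (hri : PySem.List.pyGetD r i 0 = ri) (hci : (PySem.Str.pyGet? c i).getD ' ' = ci)
    (S : PySem.Set Int) (L : List Int) (hn : 0 < n) (h : pvInv n S L) :
    pvInv n (solveAStep n r c S i) (solveBStep n L (ri, ci)) ∧
      (∀ p ∈ solveAStep n r c S i, 0 ≤ p ∧ p < n) := by
  obtain ⟨hnd, hpw, hrg, hmem⟩ := h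
  have hk0 : 0 ≤ PySem.Int.mod ri n := PySem.Int.mod_nonneg _ hn
  have hk1 : PySem.Int.mod ri n < n := PySem.Int.mod_lt _ hn
  have hA : solveAStep n r c S i = S.foldl (fun np p =>
      let np' := if ci = '0' ∨ ci = '?' then PySem.Set.add np (PySem.Int.mod (p + ri) n) else np
      if ci = '1' ∨ ci = '?' then PySem.Set.add np' (PySem.Int.mod (p - ri) n) else np')
      PySem.Set.empty := by
    simp only [solveAStep, hri, hci]
  obtain ⟨hndA, hmemA⟩ := pvFoldA_char (ci = '0' ∨ ci = '?') (ci = '1' ∨ ci = '?')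
    (fun p => PySem.Int.mod (p + ri) n) (fun p => PySem.Int.mod (p - ri) n) S
    PySem.Set.empty List.nodup_nil
  rw [hA]
  set A' := S.foldl (fun np p =>
      let np' := if ci = '0' ∨ ci = '?' then PySem.Set.add np (PySem.Int.mod (p + ri) n) else np
      if ci = '1' ∨ ci = '?' then PySem.Set.add np' (PySem.Int.mod (p - ri) n) else np')
      PySem.Set.empty with hA'
  have hredA : ∀ p ∈ A', 0 ≤ p ∧ p < n := by
    intro p hp
    rcases (hmemA p).1 hp with h' | ⟨_, _, _, rfl⟩ | ⟨_, _, _, rfl⟩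
    · simp [PySem.Set.empty] at h'
    · exact ⟨PySem.Int.mod_nonneg _ hn, PySem.Int.mod_lt _ hn⟩
    · exact ⟨PySem.Int.mod_nonneg _ hn, PySem.Int.mod_lt _ hn⟩
  have hAiff : ∀ q, (∃ p ∈ A', PySem.Int.mod p n = q) ↔ q ∈ A' := by
    intro q
    constructor
    · rintro ⟨p, hp, rfl⟩
      have := hredA p hp
      rwa [PySem.Int.mod_eq_emod_of_pos hn, pvEmodId n p this.1 this.2]
    · intro hq
      have := hredA q hq
      exact ⟨q, hq, by rw [PySem.Int.mod_eq_emod_of_pos hn]; exact pvEmodId n q this.1 this.2⟩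
  have htrans0 : ∀ q, (∃ p ∈ S, PySem.Int.mod (p + ri) n = q) ↔
      (∃ p' ∈ L, (p' + PySem.Int.mod ri n) % n = q) := by
    intro q
    constructor
    · rintro ⟨p, hp, rfl⟩
      exact ⟨PySem.Int.mod p n, (hmem _).2 ⟨p, hp, rfl⟩, (pvModAdd n p ri hn).symm⟩
    · rintro ⟨p', hp', rfl⟩
      obtain ⟨p, hp, rfl⟩ := (hmem p').1 hp'
      exact ⟨p, hp, pvModAdd n p ri hn⟩
  have htrans1 : ∀ q, (∃ p ∈ S, PySem.Int.mod (p - ri) n = q) ↔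
      (∃ p' ∈ L, (p' - PySem.Int.mod ri n) % n = q) := by
    intro q
    constructor
    · rintro ⟨p, hp, rfl⟩
      exact ⟨PySem.Int.mod p n, (hmem _).2 ⟨p, hp, rfl⟩, (pvModSub n p ri hn).symm⟩
    · rintro ⟨p', hp', rfl⟩
      obtain ⟨p, hp, rfl⟩ := (hmem p').1 hp'
      exact ⟨p, hp, pvModSub n p ri hn⟩
  obtain ⟨Ppw, Prg, Pmem⟩ := pvPlus n (PySem.Int.mod ri n) L hn hk0 hk1 hpw hrg
  obtain ⟨Mpw, Mrg, Mmem⟩ := pvMinus n (PySem.Int.mod ri n) L hn hk0 hk1 hpw hrg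
  have build : ∀ (B' : List Int), B'.Pairwise (· < ·) → (∀ q ∈ B', 0 ≤ q ∧ q < n) →
      (∀ q, q ∈ B' ↔ q ∈ A') → pvInv n A' B' ∧ (∀ p ∈ A', 0 ≤ p ∧ p < n) := by
    intro B' h1 h2 h3
    exact ⟨⟨hndA, h1, h2, fun q => (h3 q).trans (hAiff q).symm⟩, hredA⟩
  have hemp : ∀ q : Int, q ∈ (PySem.Set.empty : PySem.Set Int) ↔ False := by
    intro q; simp [PySem.Set.empty]
  by_cases hc0 : ci = '0'
  · subst hc0
    have hB : solveBStep n L (ri, '0') =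
        (L.filter (fun p => n ≤ p + PySem.Int.mod ri n)).map (fun p => p + PySem.Int.mod ri n - n)
          ++ (L.filter (fun p => p + PySem.Int.mod ri n < n)).map (fun p => p + PySem.Int.mod ri n) := by
      simp [solveBStep]
    rw [hB]
    refine build _ Ppw Prg ?_
    intro q
    rw [Pmem q, ← htrans0 q, hmemA q, hemp q]
    simp
  by_cases hc1 : ci = '1'
  · subst hc1
    have hB : solveBStep n L (ri, '1') =
        (L.filter (fun p => 0 ≤ p - PySem.Int.mod ri n)).map (fun p => p - PySem.Int.mod ri n)
          ++ (L.filter (fun p => p - PySem.Int.mod ri n < 0)).map (fun p => p - PySem.Int.mod ri n + n) := by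
      simp [solveBStep]
    rw [hB]
    refine build _ Mpw Mrg ?_
    intro q
    rw [Mmem q, ← htrans1 q, hmemA q, hemp q]
    simp
  by_cases hcq : ci = '?'
  · subst hcq
    have hB : solveBStep n L (ri, '?') =
        pvMerge ((L.filter (fun p => n ≤ p + PySem.Int.mod ri n)).map (fun p => p + PySem.Int.mod ri n - n)
            ++ (L.filter (fun p => p + PySem.Int.mod ri n < n)).map (fun p => p + PySem.Int.mod ri n))
          ((L.filter (fun p => 0 ≤ p - PySem.Int.mod ri n)).map (fun p => p - PySem.Int.mod ri n)
            ++ (L.filter (fun p => p - PySem.Int.mod ri n < 0)).map (fun p => p - PySem.Int.mod ri n + n)) := by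
      simp [solveBStep]
    rw [hB]
    refine build _ (pvMerge_pairwise _ _ Ppw Mpw) ?_ ?_
    · intro q hq
      rcases (pvMerge_mem _ _ q).1 hq with h' | h'
      · exact Prg q h'
      · exact Mrg q h'
    · intro q
      rw [pvMerge_mem, Pmem q, Mmem q, ← htrans0 q, ← htrans1 q, hmemA q, hemp q]
      simp
  · have hB : solveBStep n L (ri, ci) = [] := by
      simp [solveBStep, hc0, hc1, hcq]
    rw [hB]
    refine build _ (by simp) (by simp) ?_
    intro q
    rw [hmemA q, hemp q]
    simp [hc0, hc1, hcq]


theorem pvModSelf (n a : Int)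
    (h : (0 < n ∧ 0 ≤ a ∧ a < n) ∨ (n < 0 ∧ n < a ∧ a ≤ 0)) : PySem.Int.mod a n = a := by
  rcases h with ⟨hn, h0, h1⟩ | ⟨hn, h0, h1⟩
  · rw [PySem.Int.mod_eq_emod_of_pos hn]; exact pvEmodId n a h0 h1
  · have h3 := PySem.Int.floordiv_mul_add_mod a n
    have h4 := PySem.Int.mod_neg_bounds a hn
    rcases lt_trichotomy (PySem.Int.floordiv a n) 0 with h | h | h
    · nlinarith [h4.1, h4.2]
    · rw [h, zero_mul] at h3; omega
    · nlinarith [h4.1, h4.2]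

theorem pvNilCase (n : Int) (c : String) (x : Int)
    (hmodx : PySem.Int.mod (x - 1) n = x - 1) : solve n [] c x = solve_alt n [] c x := by
  have hof : PySem.Set.ofList [x - 1] = [x - 1] := rfl
  have hz : (([] : List Int)).zip c.toList = [] := rfl
  simp only [solve, solve_alt, List.length_nil, Nat.cast_zero, hz, List.foldl_nil,
    PySem.List.pyRange_one_eq_nil (le_refl (0 : Int)), hmodx, hof,
    PySem.List.sorted_eq_self_of_pairwise _ _ (List.pairwise_singleton _ _)]
  rfl

theorem pvFoldConst {α β : Type} (l : List α) (s : β) :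
    l.foldl (fun a _ => a) s = s := by
  induction l generalizing s with
  | nil => rfl
  | cons _ t ih => exact ih s

theorem pvAStep_invalid (n : Int) (r : List Int) (c : String) (S : PySem.Set Int) (i : Int)
    (ch : Char) (hci : (PySem.Str.pyGet? c i).getD ' ' = ch)
    (hch : ch ≠ '0' ∧ ch ≠ '1' ∧ ch ≠ '?') : solveAStep n r c S i = [] := by
  simp only [solveAStep, hci, hch.1, hch.2.1, hch.2.2, or_self, if_false, false_or,
    if_neg (by simp [hch.1, hch.2.2] : ¬(ch = '0' ∨ ch = '?')),
    if_neg (by simp [hch.2.1, hch.2.2] : ¬(ch = '1' ∨ ch = '?'))]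
  exact pvFoldConst S PySem.Set.empty

theorem pvAfold_empty (n : Int) (r : List Int) (c : String) (idxs : List Int) :
    idxs.foldl (solveAStep n r c) [] = [] := by
  induction idxs with
  | nil => rfl
  | cons i t ih => exact ih

theorem pvBStep_invalid (n : Int) (pos : List Int) (rc : Int × Char)
    (hch : rc.2 ≠ '0' ∧ rc.2 ≠ '1' ∧ rc.2 ≠ '?') : solveBStep n pos rc = [] := by
  simp only [solveBStep, if_neg hch.1, if_neg hch.2.1, if_neg hch.2.2]

theorem pvBStep_nil (n : Int) (rc : Int × Char) : solveBStep n [] rc = [] := by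
  simp only [solveBStep, List.filter_nil, List.map_nil, List.nil_append]
  split_ifs <;> simp [pvMerge]

theorem pvBfold_nil (n : Int) (l : List (Int × Char)) :
    l.foldl (solveBStep n) [] = [] := by
  induction l with
  | nil => rfl
  | cons p t ih => rw [List.foldl_cons, pvBStep_nil]; exact ih

theorem pvEmptyCase (n : Int) (r : List Int) (c : String) (x : Int) (j : Nat)
    (hjr : j < r.length) (hjc : j < c.toList.length)
    (hch : c.toList[j] ≠ '0' ∧ c.toList[j] ≠ '1' ∧ c.toList[j] ≠ '?') :
    solve n r c x = solve_alt n r c x := by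
  have hjz : j < (r.zip c.toList).length := by rw [List.length_zip]; omega
  have hci : (PySem.Str.pyGet? c (j : Int)).getD ' ' = c.toList[j] := by
    simp [pysem, List.getElem?_eq_getElem hjc]
  simp only [solve, solve_alt]
  rw [PySem.List.pyRange_one_append 0 (j : Int) (r.length : Int) (by omega)
      (by exact_mod_cast Nat.le_of_lt hjr),
    PySem.List.pyRange_one_cons (by exact_mod_cast hjr : (j : Int) < (r.length : Int)),
    List.foldl_append, List.foldl_cons,
    pvAStep_invalid n r c _ (j : Int) _ hci hch, pvAfold_empty,
    ← List.take_append_drop j (r.zip c.toList), List.foldl_append,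
    List.drop_eq_getElem_cons hjz, List.getElem_zip, List.foldl_cons,
    pvBStep_invalid n _ _ (by exact hch), pvBfold_nil]
  rfl

theorem pvFold (n : Int) (r : List Int) (c : String) (hn : 0 < n)
    (hlen : r.length ≤ c.toList.length) :
    ∀ (m j : Nat), m = r.length - j → j ≤ r.length → ∀ (S : PySem.Set Int) (L : List Int), pvInv n S L →
      pvInv n ((PySem.List.pyRange (j : Int) (r.length : Int)).foldl (solveAStep n r c) S)
        (((r.zip c.toList).drop j).foldl (solveBStep n) L) ∧
      (j < r.length →
        ∀ p ∈ (PySem.List.pyRange (j : Int) (r.length : Int)).foldl (solveAStep n r c) S, 0 ≤ p ∧ p < n) := by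
  intro m
  induction m with
  | zero =>
    intro j hm hj S L hInv
    have hje : j = r.length := by omega
    subst hje
    rw [PySem.List.pyRange_one_eq_nil (le_refl _)]
    have hzr : (r.zip c.toList).drop r.length = [] := by
      apply List.drop_eq_nil_of_le
      rw [List.length_zip]; omega
    rw [hzr]
    simp only [List.foldl_nil]
    exact ⟨hInv, fun h => (lt_irrefl _ h).elim⟩
  | succ m ih =>
    intro j hm hj S L hInv
    have hjlt : j < r.length := by omega
    have hjz : j < (r.zip c.toList).length := by rw [List.length_zip]; omega
    have hjc : j < c.toList.length := by omega
    have hcast : ((j : Int)) < (r.length : Int) := by exact_mod_cast hjlt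
    rw [PySem.List.pyRange_one_cons hcast, List.drop_eq_getElem_cons hjz, List.getElem_zip,
      List.foldl_cons, List.foldl_cons]
    have hri : PySem.List.pyGetD r (j : Int) 0 = r[j] := by
      rw [PySem.List.pyGetD_natCast]
      exact List.getD_eq_getElem r 0 hjlt
    have hci : (PySem.Str.pyGet? c (j : Int)).getD ' ' = c.toList[j] := by
      simp [pysem, hjc, List.getElem?_eq_getElem hjc]
    obtain ⟨hInv', hred'⟩ := pvStep n (r[j]) (c.toList[j]) r c (j : Int) hri hci S L hn hInv
    have hc1 : ((j : Int) + 1) = ((j + 1 : Nat) : Int) := by push_cast; ring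
    rw [hc1]
    obtain ⟨h1, h2⟩ := ih (j + 1) (by omega) (by omega) _ _ hInv'
    refine ⟨h1, fun _ => ?_⟩
    by_cases hlt : j + 1 < r.length
    · exact h2 hlt
    · have hnil : PySem.List.pyRange ((j + 1 : Nat) : Int) (r.length : Int) = [] :=
        PySem.List.pyRange_one_eq_nil (by exact_mod_cast (by omega : r.length ≤ j + 1))
      rw [hnil]
      simpa using hred'

theorem pvOut (n : Int) (S : PySem.Set Int) (L : List Int) (hn : 0 < n) (h : pvInv n S L)
    (hred : ∀ p ∈ S, 0 ≤ p ∧ p < n) :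
    PySem.Int.toStr (PySem.Set.len S) ++ "\n" ++
      PySem.Str.join " " ((PySem.List.sorted S (fun p => p)).map (fun p => PySem.Int.toStr (p + 1))) =
    PySem.Int.toStr ((L.length : Int)) ++ "\n" ++
      PySem.Str.join " " (L.map (fun p => PySem.Int.toStr (p + 1))) := by
  obtain ⟨hnd, hpw, hrg, hmem⟩ := h
  have hLnd : L.Nodup := hpw.imp (fun h => ne_of_lt h)
  have hLS : ∀ q, q ∈ L ↔ q ∈ S := by
    intro q
    rw [hmem q]
    constructor
    · rintro ⟨p, hp, rfl⟩
      have := hred p hp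
      rwa [PySem.Int.mod_eq_emod_of_pos hn, pvEmodId n p this.1 this.2]
    · intro hq
      have := hred q hq
      exact ⟨q, hq, by rw [PySem.Int.mod_eq_emod_of_pos hn]; exact pvEmodId n q this.1 this.2⟩
  have hperm : L.Perm S := (List.perm_ext_iff_of_nodup hLnd hnd).2 hLS
  have hsorted : PySem.List.sorted S (fun p => p) = L :=
    PySem.List.sorted_eq_of_perm_of_pairwise_lt S L _ hperm hpw
  have hlen : PySem.Set.len S = (L.length : Int) := by
    simp [PySem.Set.len, hperm.length_eq]
  rw [hsorted, hlen]


-- str(m) for a natural m: Nat.toDigitsCore facts needed to see that str is injective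
theorem pvCoreAppend (b f : Nat) : ∀ (n : Nat) (l : List Char),
    Nat.toDigitsCore b f n l = Nat.toDigitsCore b f n [] ++ l := by
  induction f with
  | zero => intro n l; simp [Nat.toDigitsCore]
  | succ f ih =>
    intro n l
    simp only [Nat.toDigitsCore]
    by_cases h : n / b = 0
    · simp [h]
    · simp only [h, if_false]
      rw [ih (n / b) (Nat.digitChar (n % b) :: l), ih (n / b) [Nat.digitChar (n % b)]]
      simp

theorem pvCoreVal (f : Nat) : ∀ n, n < f →
    (Nat.toDigitsCore 10 f n []).foldl (fun a c => a * 10 + (c.toNat - 48)) 0 = n := by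
  induction f with
  | zero => intro n hn; omega
  | succ f ih =>
    intro n hn
    have hm : n % 10 < 10 := Nat.mod_lt _ (by norm_num)
    have hd : (Nat.digitChar (n % 10)).toNat = 48 + n % 10 := by
      interval_cases h : n % 10 <;> decide
    simp only [Nat.toDigitsCore]
    by_cases h : n / 10 = 0
    · simp only [h, if_true, List.foldl_cons, List.foldl_nil, hd]
      omega
    · simp only [h, if_false]
      rw [pvCoreAppend, List.foldl_append]
      have hlt : n / 10 < f := by omega
      rw [ih (n / 10) hlt]
      simp only [List.foldl_cons, List.foldl_nil, hd]
      omega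

theorem pvCoreDigits (f : Nat) : ∀ n, ∀ ch ∈ Nat.toDigitsCore 10 f n [],
    48 ≤ ch.toNat ∧ ch.toNat ≤ 57 := by
  induction f with
  | zero => intro n ch hch; simp [Nat.toDigitsCore] at hch
  | succ f ih =>
    intro n ch hch
    have hm : n % 10 < 10 := Nat.mod_lt _ (by norm_num)
    have hd : (Nat.digitChar (n % 10)).toNat = 48 + n % 10 := by
      interval_cases h : n % 10 <;> decide
    simp only [Nat.toDigitsCore] at hch
    by_cases h : n / 10 = 0
    · simp only [h, if_true, List.mem_singleton] at hch
      subst hch; omega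
    · simp only [h, if_false] at hch
      rw [pvCoreAppend, List.mem_append, List.mem_singleton] at hch
      rcases hch with hch | hch
      · exact ih (n / 10) ch hch
      · subst hch; omega

theorem pvToDigitsVal (n : Nat) :
    (Nat.toDigits 10 n).foldl (fun a c => a * 10 + (c.toNat - 48)) 0 = n :=
  pvCoreVal (n + 1) n (by omega)

theorem pvToDigitsNeNil (n : Nat) : Nat.toDigits 10 n ≠ [] := by
  show Nat.toDigitsCore 10 (n + 1) n [] ≠ []
  simp only [Nat.toDigitsCore]
  by_cases h : n / 10 = 0
  · simp [h]
  · simp only [h, if_false]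
    rw [pvCoreAppend]
    simp

theorem pvToCharsInj (a b : Int) (h : PySem.Int.toChars a = PySem.Int.toChars b) : a = b := by
  have hds : ∀ m k : Nat, Nat.toDigits 10 m = Nat.toDigits 10 k → m = k := by
    intro m k hmk
    rw [← pvToDigitsVal m, ← pvToDigitsVal k, hmk]
  simp only [PySem.Int.toChars] at h
  by_cases ha : a < 0 <;> by_cases hb : b < 0
  · simp only [if_pos ha, if_pos hb, List.cons.injEq, true_and] at h
    have := hds _ _ h
    omega
  · simp only [if_pos ha, if_neg hb] at h
    rcases hM : Nat.toDigits 10 b.toNat with _ | ⟨ch, t⟩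
    · exact absurd hM (pvToDigitsNeNil _)
    · rw [hM, List.cons.injEq] at h
      have hdig := pvCoreDigits (b.toNat + 1) b.toNat ch (by rw [show Nat.toDigitsCore 10 (b.toNat + 1) b.toNat [] = Nat.toDigits 10 b.toNat from rfl, hM]; simp)
      rw [← h.1] at hdig
      simp at hdig
  · simp only [if_neg ha, if_pos hb] at h
    rcases hM : Nat.toDigits 10 a.toNat with _ | ⟨ch, t⟩
    · exact absurd hM (pvToDigitsNeNil _)
    · rw [hM, List.cons.injEq] at h
      have hdig := pvCoreDigits (a.toNat + 1) a.toNat ch (by rw [show Nat.toDigitsCore 10 (a.toNat + 1) a.toNat [] = Nat.toDigits 10 a.toNat from rfl, hM]; simp)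
      rw [h.1] at hdig
      simp at hdig
  · simp only [if_neg ha, if_neg hb] at h
    have := hds _ _ h
    omega

-- ===== VERDICT (by name: the statement is the Claim_ definition above) =====
theorem solve_spec : Claim_unchanged_solve := by
  intro n r c x hdom hpre hD
  show solve n r c x = solve_alt n r c x
  obtain ⟨hn0, hcases⟩ := hpre
  have hnil : r = [] → solve n r c x = solve_alt n r c x := by
    rintro rfl
    have hDc : (1 ≤ x ∧ x ≤ n) ∨ (n < 0 ∧ n + 2 ≤ x ∧ x ≤ 1) := by
      by_contra hcon
      exact hD ⟨rfl, hcon⟩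
    apply pvNilCase
    rcases hDc with ⟨h1, h2⟩ | ⟨h1, h2, h3⟩
    · exact pvModSelf n (x - 1) (Or.inl ⟨by omega, by omega, by omega⟩)
    · exact pvModSelf n (x - 1) (Or.inr ⟨h1, by omega, by omega⟩)
  rcases hcases with hre | ⟨hn1, hlenI⟩ | hinv
  · exact hnil hre
  · have hn : 0 < n := hn1
    have hlen : r.length ≤ c.toList.length := by
      rw [PySem.Str.len_eq] at hlenI; exact_mod_cast hlenI
    cases r with
    | nil => exact hnil rfl
    | cons a r' =>
      have hInv0 : pvInv n (PySem.Set.ofList [x - 1]) [PySem.Int.mod (x - 1) n] := by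
        refine ⟨PySem.Set.nodup_ofList _, List.pairwise_singleton _ _, ?_, ?_⟩
        · intro q hq
          rw [List.mem_singleton] at hq
          subst hq
          exact ⟨PySem.Int.mod_nonneg _ hn, PySem.Int.mod_lt _ hn⟩
        · intro q
          constructor
          · intro hq
            rw [List.mem_singleton] at hq
            subst hq
            exact ⟨x - 1, by rw [show PySem.Set.ofList [x - 1] = [x - 1] from rfl]; simp, rfl⟩
          · rintro ⟨p, hp, rfl⟩
            rw [show PySem.Set.ofList [x - 1] = [x - 1] from rfl, List.mem_singleton] at hp
            subst hp
            simp
      obtain ⟨hInv, hred⟩ :=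
        pvFold n (a :: r') c hn hlen (a :: r').length 0 (by omega) (by omega) _ _ hInv0
      have hred' := hred (by simp)
      simp only [Nat.cast_zero, List.drop_zero] at hInv hred'
      simp only [solve, solve_alt]
      exact pvOut n _ _ hn hInv hred'
  · obtain ⟨ch, hmem, hch⟩ := hinv
    rw [List.mem_iff_getElem] at hmem
    obtain ⟨j, hjlen, hj⟩ := hmem
    have hjb : j < r.length ∧ j < c.toList.length := by
      rw [List.length_take] at hjlen; omega
    have hgt : c.toList[j] = ch := by
      rw [← hj, List.getElem_take]
    exact pvEmptyCase n r c x j hjb.1 hjb.2 (hgt ▸ hch)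

theorem solve_changed : Claim_changed_solve := by
  unfold Claim_changed_solve; decide

theorem solve_tight : Claim_exact_solve := by
  intro n r c x hdom hpre hd heq
  obtain ⟨hre, hnot⟩ := hd
  subst hre
  obtain ⟨hn0, -⟩ := hpre
  have hA : solve n [] c x =
      PySem.Int.toStr 1 ++ "\n" ++ PySem.Str.join " " [PySem.Int.toStr (x - 1 + 1)] := rfl
  have hB : solve_alt n [] c x =
      PySem.Int.toStr 1 ++ "\n" ++
        PySem.Str.join " " [PySem.Int.toStr (PySem.Int.mod (x - 1) n + 1)] := rfl
  rw [hA, hB] at heq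
  have hl := congrArg String.toList heq
  simp only [String.toList_append, PySem.Str.toList_join, List.map_cons, List.map_nil,
    PySem.Chars.join_singleton, List.append_assoc, List.append_cancel_left_eq,
    PySem.Int.toList_toStr] at hl
  have hxy : x - 1 + 1 = PySem.Int.mod (x - 1) n + 1 := pvToCharsInj _ _ hl
  rcases lt_trichotomy n 0 with hn | hn | hn
  · have hbd := PySem.Int.mod_neg_bounds (x - 1) hn
    exact hnot (Or.inr ⟨hn, by omega, by omega⟩)
  · exact hn0 hn
  · have h1 := PySem.Int.mod_nonneg (x - 1) hn
    have h2 := PySem.Int.mod_lt (x - 1) hn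
    exact hnot (Or.inl ⟨by omega, by omega⟩)
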